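-- pv_equiv track=rewrite | github.com/jingshuiliushen1990/stageFallCgeck | rwFile/getExcelData.py | joinElem2Url
-- ===== SOURCE A (Python) =====
-- def joinElem2Url(ilist):
--     urlAddr = ''
--     for i in range(len(ilist)):
--         if i == 0:
--             if ilist[i].endswith('/'):
--                 urlAddr += ilist[i]
--             else:
--                 urlAddr += ilist[i] + '/'
--         elif i == 1:
--             urlAddr += str(int(ilist[i]))
--         else:
--             urlAddr += ilist[i]
--     return urlAddr
-- ===== SOURCE B (Python) =====
-- def _rest(xs):
--     # remaining path segments, appended verbatim, built suffix-first
--     if not xs: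
--         return ''
--     return xs[0] + _rest(xs[1:])
--
-- def _afterHost(xs):
--     # everything after the host: normalised int segment, then the rest
--     if not xs:
--         return ''
--     return str(int(xs[0])) + _rest(xs[1:])
--
-- def joinElem2Url(ilist):
--     if not ilist:
--         return ''
--     head = ilist[0]
--     if not head.endswith('/'):
--         head += '/'
--     return head + _afterHost(ilist[1:])
-- ===== Notes on version B (the rewrite author's own statement) =====
-- stated objective: alternative
-- what changed: Replaces A's indexed range-loop with per-index dispatch and a forward string accumulator by structural recursion on the list: a chain of recursive helpers (head, then _afterHost, then _rest) that builds the result suffix-first, with no indices, no loop and no accumulator.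
import Mathlib
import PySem

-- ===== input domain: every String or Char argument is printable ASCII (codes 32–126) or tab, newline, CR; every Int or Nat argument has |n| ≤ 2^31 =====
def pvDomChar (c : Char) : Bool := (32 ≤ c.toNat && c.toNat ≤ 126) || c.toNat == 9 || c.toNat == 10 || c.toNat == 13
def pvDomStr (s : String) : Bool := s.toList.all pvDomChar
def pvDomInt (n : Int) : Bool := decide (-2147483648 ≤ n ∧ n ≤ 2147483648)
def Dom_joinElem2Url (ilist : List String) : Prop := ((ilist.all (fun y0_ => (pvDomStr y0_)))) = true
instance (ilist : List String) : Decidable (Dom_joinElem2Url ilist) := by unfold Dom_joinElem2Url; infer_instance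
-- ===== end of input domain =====

-- B replaces A's indexed loop + forward accumulator by structural recursion on the list,
-- building the string suffix-first through a chain of helpers; objective: alternative, same cost.

-- ===== PORT A =====
def joinElem2Url (ilist : List String) : String :=
  (PySem.List.pyRange 0 (ilist.length : Int) 1).foldl (fun urlAddr i =>
    if i = 0 then
      if PySem.Str.endswith (PySem.List.pyGetD ilist i "") "/" then
        urlAddr ++ PySem.List.pyGetD ilist i ""
      else
        urlAddr ++ (PySem.List.pyGetD ilist i "" ++ "/")
    else if i = 1 then
      urlAddr ++ PySem.Int.toStr ((PySem.Int.ofStr? (PySem.List.pyGetD ilist i "")).getD 0)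
    else
      urlAddr ++ PySem.List.pyGetD ilist i "") ""

-- ===== PORT B =====
def pvRest (xs : List String) : String :=
  match xs with
  | [] => ""
  | x :: t => x ++ pvRest t

def pvAfterHost (xs : List String) : String :=
  match xs with
  | [] => ""
  | x :: t => PySem.Int.toStr ((PySem.Int.ofStr? x).getD 0) ++ pvRest t

def joinElem2Url_alt (ilist : List String) : String :=
  match ilist with
  | [] => ""
  | h :: t =>
    (if PySem.Str.endswith h "/" then h else h ++ "/") ++ pvAfterHost t

-- ===== PRECONDITION & SPEC =====
-- Pre_ excludes exactly the inputs where Python A raises ValueError: a list of length ≥ 2 whose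
-- second element is not int-parsable (B raises the same ValueError there).
def Pre_joinElem2Url (ilist : List String) : Prop :=
  2 ≤ ilist.length → (PySem.Int.ofStr? (ilist.getD 1 "")).isSome = true
instance (ilist : List String) : Decidable (Pre_joinElem2Url ilist) := by
  unfold Pre_joinElem2Url; infer_instance
def pvWitness_joinElem2Url : List String := ["http://host", "7", "a/b"]

def Spec_joinElem2Url (ilist : List String) (out : String) : Prop := out = joinElem2Url_alt ilist
instance (ilist : List String) (out : String) : Decidable (Spec_joinElem2Url ilist out) := by
  unfold Spec_joinElem2Url; infer_instance

-- ===== CLAIM (what is proved, stated in full; the proofs are below) =====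
def Claim_equal_joinElem2Url : Prop := ∀ (ilist : List String), Dom_joinElem2Url ilist → Pre_joinElem2Url ilist → Spec_joinElem2Url ilist (joinElem2Url ilist)

-- ===== LEMMAS AND PROOFS =====

theorem pvFoldl_append_rest (l : List String) (init : String) :
    l.foldl (fun a x => a ++ x) init = init ++ pvRest l := by
  induction l generalizing init with
  | nil => simp [pvRest]
  | cons x t ih => simp only [List.foldl, ih, pvRest, String.append_assoc]

theorem joinElem2Url_spec : Claim_equal_joinElem2Url := by
  intro ilist _ _
  unfold Spec_joinElem2Url
  match ilist with
  | [] => rfl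
  | [a] =>
    show joinElem2Url [a] = joinElem2Url_alt [a]
    unfold joinElem2Url joinElem2Url_alt
    rw [show ((([a] : List String).length : Int)) = 0 + 1 by simp,
        PySem.List.pyRange_one_singleton]
    simp only [List.foldl]
    norm_num [PySem.List.pyGetD_zero_cons, pvAfterHost]
  | a :: b :: rest =>
    show joinElem2Url (a :: b :: rest) = joinElem2Url_alt (a :: b :: rest)
    unfold joinElem2Url joinElem2Url_alt
    have hlen : (((a :: b :: rest).length : Int)) = 2 + (rest.length : Int) := by
      simp; omega
    rw [PySem.List.pyRange_one_cons (by omega),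
        PySem.List.pyRange_one_cons (by rw [hlen]; omega)]
    simp only [List.foldl]
    norm_num [PySem.List.pyGetD_zero_cons]
    rw [PySem.List.foldl_congr_mem _ _
        (fun urlAddr i => urlAddr ++ PySem.List.pyGetD (a :: b :: rest) i "") _
        (by intro acc i hi
            have h2 : (2:Int) ≤ i := (PySem.List.mem_pyRange_one.mp hi).1
            simp only
            rw [if_neg (by omega), if_neg (by omega)])]
    rw [show ((rest.length : Int) + 1 + 1) = ((a :: b :: rest).length : Int) by simp,
        PySem.List.foldl_pyRange_pyGetD' (a :: b :: rest) ""
          (fun acc x => acc ++ x) _ (by norm_num : (0:Int) ≤ 2)]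
    simp only [show Int.toNat 2 = 2 from rfl, List.drop, pvFoldl_append_rest, pvAfterHost,
      String.append_assoc, show PySem.List.pyGetD (a :: b :: rest) 1 "" = b by
        simp [PySem.List.pyGetD, PySem.List.pyGet?, PySem.List.pyIdx?]]
    rfl
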